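-- pv_equiv track=rewrite | github.com/said0063/Connect4-Python | Connect4.py | connectk
-- ===== SOURCE A (Python) =====
-- def connectk(lst,k,player):
--     total = 0
--     for item in lst:
--         if item == player:
--             total += 1
--             if total == k:
--                 return True
--         else:
--             total = 0
--     return False
-- ===== SOURCE B (Python) =====
-- from itertools import groupby
--
-- def connectk(lst, k, player):
--     if k <= 0:
--         return False
--     return any(key == player and sum(1 for _ in grp) >= k
--                for key, grp in groupby(lst))
-- ===== Notes on version B (the rewrite author's own statement) =====
-- stated objective: idiomatic
-- what changed: Replaces the manual running-counter-with-reset loop by itertools.groupby: form maximal runs of equal elements and return True iff some run keyed by player has length >= k (with an explicit k <= 0 guard).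
import Mathlib
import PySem

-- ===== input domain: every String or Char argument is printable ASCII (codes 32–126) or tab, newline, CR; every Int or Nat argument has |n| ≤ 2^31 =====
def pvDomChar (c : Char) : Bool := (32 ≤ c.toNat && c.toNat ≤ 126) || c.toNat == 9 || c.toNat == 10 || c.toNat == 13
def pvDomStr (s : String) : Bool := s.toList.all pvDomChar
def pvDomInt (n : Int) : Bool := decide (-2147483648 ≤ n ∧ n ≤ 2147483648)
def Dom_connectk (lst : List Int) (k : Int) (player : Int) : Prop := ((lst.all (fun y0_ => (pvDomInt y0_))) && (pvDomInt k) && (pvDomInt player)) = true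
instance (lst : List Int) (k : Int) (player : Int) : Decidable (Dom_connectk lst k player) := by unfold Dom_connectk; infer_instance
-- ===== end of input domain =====

-- B replaces A's running-counter loop by a groupby-style decomposition into maximal runs (idiomatic; same cost).


-- ===== PORT A =====
-- A's loop: running counter 'total', reset on mismatch, early return when total == k.
def connectkLoop (k player : Int) : List Int → Int → Bool
  | [], _ => false
  | item :: rest, total =>
    if item = player then
      if total + 1 = k then true else connectkLoop k player rest (total + 1)
    else
      connectkLoop k player rest 0

def connectk (lst : List Int) (k : Int) (player : Int) : Bool :=
  connectkLoop k player lst 0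

-- ===== PORT B =====
-- groupby(lst): maximal runs of equal elements as (key, length) pairs.
def runsAux (cur cnt : Int) : List Int → List (Int × Int)
  | [] => [(cur, cnt)]
  | y :: ys => if y = cur then runsAux cur (cnt + 1) ys else (cur, cnt) :: runsAux y 1 ys

def runs : List Int → List (Int × Int)
  | [] => []
  | x :: xs => runsAux x 1 xs

def connectk_alt (lst : List Int) (k : Int) (player : Int) : Bool :=
  if k ≤ 0 then false
  else (runs lst).any (fun r => r.1 = player && k ≤ r.2)

-- ===== PRECONDITION & SPEC =====
def Spec_connectk (lst : List Int) (k : Int) (player : Int) (out : Bool) : Prop := out = connectk_alt lst k player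
instance (lst : List Int) (k : Int) (player : Int) (out : Bool) : Decidable (Spec_connectk lst k player out) := by unfold Spec_connectk; infer_instance

-- ===== CLAIM (what is proved, stated in full; the proofs are below) =====
def Claim_equal_connectk : Prop := ∀ (lst : List Int) (k : Int) (player : Int), Dom_connectk lst k player → Spec_connectk lst k player (connectk lst k player)

-- ===== LEMMAS AND PROOFS =====

-- With k ≤ 0 the counter check 'total == k' can never fire (total stays ≥ 0 and is checked after +1).
theorem loop_false_of_k_nonpos (k player : Int) (hk : k ≤ 0) :
    ∀ (l : List Int) (total : Int), 0 ≤ total → connectkLoop k player l total = false := by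
  intro l
  induction l with
  | nil => intro total _; rfl
  | cons x xs ih =>
    intro total ht
    simp only [connectkLoop]
    split_ifs with h1 h2
    · omega
    · exact ih (total + 1) (by omega)
    · exact ih 0 (by omega)

-- Once the pending run already has length ≥ k with key = player, B reports true.
theorem anyRun_true (k player : Int) :
    ∀ (ys : List Int) (cur cnt : Int), cur = player → k ≤ cnt →
      (runsAux cur cnt ys).any (fun r => r.1 = player && k ≤ r.2) = true := by
  intro ys
  induction ys with
  | nil => intro cur cnt h1 h2; simp [runsAux, h1, h2]
  | cons y ys ih =>
    intro cur cnt h1 h2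
    simp only [runsAux]
    split_ifs with h
    · exact ih cur (cnt + 1) h1 (by omega)
    · simp [h1, h2]

-- Invariant: A's counter equals the length of the pending run iff its key is the player.
theorem main_lemma (k player : Int) (hk : 1 ≤ k) :
    ∀ (ys : List Int) (cur cnt : Int), (cur = player → cnt < k) →
      connectkLoop k player ys (if cur = player then cnt else 0) =
        (runsAux cur cnt ys).any (fun r => r.1 = player && k ≤ r.2) := by
  intro ys
  induction ys with
  | nil =>
    intro cur cnt hlt
    by_cases h : cur = player
    · simp [connectkLoop, runsAux, h]; omega
    · simp [connectkLoop, runsAux, h]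
  | cons y ys ih =>
    intro cur cnt hlt
    by_cases hyc : y = cur
    · subst hyc
      by_cases hcp : y = player
      · have hck := hlt hcp
        have ih' := ih y (cnt + 1)
        rw [if_pos hcp] at ih'
        by_cases hek : cnt + 1 = k
        · have ht := anyRun_true k player ys y (cnt + 1) hcp (by omega)
          simp only [connectkLoop, runsAux, if_pos hcp, if_pos hek]
          exact ht.symm
        · simp only [connectkLoop, runsAux, if_pos hcp, if_neg hek]
          exact ih' (fun _ => by omega)
      · have ih' := ih y (cnt + 1)
        rw [if_neg hcp] at ih'
        simp only [connectkLoop, runsAux, if_neg hcp]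
        exact ih' (fun h => absurd h hcp)
    · have hfirst : ((cur, cnt).1 = player && k ≤ (cur, cnt).2 : Bool) = false := by
        by_cases h : cur = player
        · simp [h]; omega
        · simp [h]
      simp only [runsAux, if_neg hyc, List.any_cons, hfirst, Bool.false_or]
      by_cases hyp : y = player
      · have h1 : ¬ cur = player ∨ True := Or.inr trivial
        by_cases h1k : (0 : Int) + 1 = k
        · simp only [connectkLoop, if_pos hyp]
          by_cases hcp : cur = player
          · exact absurd (hyp.trans hcp.symm) hyc
          · rw [if_neg hcp, if_pos h1k]
            exact (anyRun_true k player ys y 1 hyp (by omega)).symm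
        · simp only [connectkLoop, if_pos hyp]
          by_cases hcp : cur = player
          · exact absurd (hyp.trans hcp.symm) hyc
          · rw [if_neg hcp, if_neg h1k]
            have ih' := ih y 1
            rw [if_pos hyp] at ih'
            exact ih' (fun _ => by omega)
      · simp only [connectkLoop, if_neg hyp]
        have ih' := ih y 1
        rw [if_neg hyp] at ih'
        exact ih' (fun h => absurd h hyp)

-- ===== VERDICT (by name: the statement is the Claim_ definition above) =====
theorem connectk_spec : Claim_equal_connectk := by
  unfold Claim_equal_connectk
  intro lst k player _
  unfold Spec_connectk connectk connectk_alt
  by_cases hk : k ≤ 0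
  · rw [if_pos hk]
    exact loop_false_of_k_nonpos k player hk lst 0 le_rfl
  · rw [if_neg hk]
    have hk1 : 1 ≤ k := by omega
    cases lst with
    | nil => rfl
    | cons x xs =>
      simp only [runs, connectkLoop]
      by_cases hxp : x = player
      · rw [if_pos hxp]
        by_cases h1k : 0 + 1 = k
        · rw [if_pos h1k]
          exact (anyRun_true k player xs x 1 hxp (by omega)).symm
        · rw [if_neg h1k]
          have := main_lemma k player hk1 xs x 1 (fun _ => by omega)
          rwa [if_pos hxp] at this
      · rw [if_neg hxp]
        have := main_lemma k player hk1 xs x 1 (fun h => absurd h hxp)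
        rwa [if_neg hxp] at this
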